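-- pv_equiv track=rewrite | github.com/francod2004/unify-crm | cold_email_agent.py | _is_dead_end_email
-- ===== SOURCE A (Python) =====
-- DEAD_END_EMAILS = {"noreply@", "no-reply@", "donotreply@", "do-not-reply@"}
--
-- DEAD_END_DOMAINS = {
--     "canpages.ca",
--     "foodpages.ca",
--     "yellowpages.ca",
--     "yp.ca",
--     "411.ca",
--     "findopen.ca",
--     "findopenhours.com",
--     "cylex-canada.ca",
--     "yelp.com",
--     "yelp.ca",
--     "bbb.org",
--     "facebook.com",
--     "instagram.com",
--     "twitter.com",
--     "x.com",
--     "linkedin.com",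
--     "google.com",
-- }
--
-- def _is_dead_end_email(email: str) -> bool:
--     """True if email is a dead-end prefix (noreply@) or an aggregator domain."""
--     e = (email or "").strip().lower()
--     if not e or "@" not in e:
--         return False
--     if any(e.startswith(p) for p in DEAD_END_EMAILS):
--         return True
--     domain = e.split("@", 1)[1]
--     if any(domain == d or domain.endswith("." + d) for d in DEAD_END_DOMAINS):
--         return True
--     return False
-- ===== SOURCE B (Python) =====
-- DEAD_END_EMAILS = {"noreply@", "no-reply@", "donotreply@", "do-not-reply@"}
--
-- DEAD_END_DOMAINS = {
--     "canpages.ca", "foodpages.ca", "yellowpages.ca", "yp.ca", "411.ca",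
--     "findopen.ca", "findopenhours.com", "cylex-canada.ca", "yelp.com",
--     "yelp.ca", "bbb.org", "facebook.com", "instagram.com", "twitter.com",
--     "x.com", "linkedin.com", "google.com",
-- }
--
-- def _is_dead_end_email(email: str) -> bool:
--     """True if email is a dead-end prefix (noreply@) or an aggregator domain."""
--     e = (email or "").strip().lower()
--     if not e or "@" not in e:
--         return False
--     k = e.index("@")
--     if e[: k + 1] in DEAD_END_EMAILS:
--         return True
--     domain = e[k + 1 :]
--     return any(
--         (i == 0 or domain[i - 1] == ".") and domain[i:] in DEAD_END_DOMAINS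
--         for i in range(len(domain) + 1)
--     )
-- ===== Notes on version B (the rewrite author's own statement) =====
-- stated objective: alternative
-- what changed: A scans each candidate set testing e.startswith(p) / domain==d or domain.endswith('.'+d); B inverts the traversal: it computes the first-'@' index once, looks the local part e[:k+1] up directly in DEAD_END_EMAILS, and enumerates the dot-aligned suffixes of the domain, looking each up in DEAD_END_DOMAINS.
import Mathlib
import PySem

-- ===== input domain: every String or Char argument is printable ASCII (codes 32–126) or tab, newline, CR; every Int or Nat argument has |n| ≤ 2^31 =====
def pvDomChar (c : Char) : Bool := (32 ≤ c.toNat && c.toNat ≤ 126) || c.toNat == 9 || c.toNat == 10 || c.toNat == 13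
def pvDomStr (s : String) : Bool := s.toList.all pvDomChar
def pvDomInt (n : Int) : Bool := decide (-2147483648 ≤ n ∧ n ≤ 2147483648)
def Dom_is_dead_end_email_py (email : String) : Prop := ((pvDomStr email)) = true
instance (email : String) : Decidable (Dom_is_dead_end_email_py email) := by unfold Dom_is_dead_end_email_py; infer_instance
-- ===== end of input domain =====

-- B replaces A's scans of the candidate sets (any(e.startswith(p)…), any(domain == d or domain.endswith('.'+d)…))
-- by direct lookups: the local part e[:k+1] is looked up once, and the dot-aligned suffixes of the domain are
-- enumerated and each looked up; objective: alternative (same observable behaviour, no speed claim).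

-- ===== PORT A =====
def deadEndEmails : List (List Char) :=
  ["noreply@", "no-reply@", "donotreply@", "do-not-reply@"].map String.toList

def deadEndDomains : List (List Char) :=
  ["canpages.ca", "foodpages.ca", "yellowpages.ca", "yp.ca", "411.ca",
   "findopen.ca", "findopenhours.com", "cylex-canada.ca", "yelp.com",
   "yelp.ca", "bbb.org", "facebook.com", "instagram.com", "twitter.com",
   "x.com", "linkedin.com", "google.com"].map String.toList

def is_dead_end_email_py (email : String) : Bool :=
  let cs := email.toList
  let e := PySem.Chars.lower (PySem.Chars.strip (if cs.isEmpty then [] else cs))  -- (email or "").strip().lower()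
  if e.isEmpty || !(PySem.Chars.isIn ['@'] e) then false
  else if deadEndEmails.any (fun p => PySem.Chars.startswith e p) then true
  else
    -- e.split("@", 1)[1]; index 1 is always in range because '@' ∈ e
    let domain := (PySem.List.pyGet? (PySem.Chars.splitOnMax e ['@'] 1) 1).getD []
    if deadEndDomains.any (fun d => domain == d || PySem.Chars.endswith domain ('.' :: d)) then true
    else false

-- ===== PORT B =====
def is_dead_end_email_py_alt (email : String) : Bool :=
  let cs := email.toList
  let e := PySem.Chars.lower (PySem.Chars.strip (if cs.isEmpty then [] else cs))  -- (email or "").strip().lower()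
  if e.isEmpty || !(PySem.Chars.isIn ['@'] e) then false
  else
    let k := PySem.Chars.find e ['@']          -- e.index("@"); '@' ∈ e so k ≥ 0
    if deadEndEmails.contains (PySem.List.slice e none (some (k + 1))) then true
    else
      let domain := PySem.List.slice e (some (k + 1)) none
      (PySem.List.pyRange 0 (domain.length + 1) 1).any (fun i =>
        (i == 0 || PySem.List.pyGet? domain (i - 1) == some '.') &&
        deadEndDomains.contains (PySem.List.slice domain (some i) none))

-- ===== PRECONDITION & SPEC =====
def Spec_is_dead_end_email_py (email : String) (out : Bool) : Prop := out = is_dead_end_email_py_alt email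
instance (email : String) (out : Bool) : Decidable (Spec_is_dead_end_email_py email out) := by unfold Spec_is_dead_end_email_py; infer_instance

-- ===== CLAIM (what is proved, stated in full; the proofs are below) =====
def Claim_equal_is_dead_end_email_py : Prop := ∀ (email : String), Dom_is_dead_end_email_py email → Spec_is_dead_end_email_py email (is_dead_end_email_py email)

-- ===== LEMMAS AND PROOFS =====

-- with maxsplit exhausted the splitter flushes the rest as one piece
lemma go_zero (fuel : Nat) (l cur : List Char) (acc : List (List Char)) :
    PySem.Chars.splitOnMax.go ['@'] fuel 0 l cur acc = ((cur.reverse ++ l) :: acc).reverse := by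
  cases fuel with
  | zero => simp [PySem.Chars.splitOnMax.go]
  | succ m => cases l <;> simp [PySem.Chars.splitOnMax.go]

-- one allowed split on a single-char separator: the first hit splits, the rest is flushed
lemma go_one (n : Nat) : ∀ (l cur : List Char) (acc : List (List Char)), l.length < n →
    PySem.Chars.splitOnMax.go ['@'] n 1 l cur acc =
      if '@' ∈ l then
        acc.reverse ++ [cur.reverse ++ l.takeWhile (· ≠ '@'), (l.dropWhile (· ≠ '@')).tail]
      else acc.reverse ++ [cur.reverse ++ l] := by
  induction n with
  | zero => intro l cur acc h; omega
  | succ m ih =>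
    intro l cur acc h
    cases l with
    | nil => simp [PySem.Chars.splitOnMax.go]
    | cons c rest =>
      by_cases hc : c = '@'
      · subst hc
        simp [PySem.Chars.splitOnMax.go, go_zero, List.takeWhile, List.dropWhile]
      · have : rest.length < m := by simp at h; omega
        simp [PySem.Chars.splitOnMax.go, hc, ih rest (c :: cur) acc this, Ne.symm hc]

-- e.split("@", 1) with '@' ∈ e
lemma split_char (e : List Char) (h : '@' ∈ e) :
    PySem.Chars.splitOnMax e ['@'] 1 = [e.takeWhile (· ≠ '@'), (e.dropWhile (· ≠ '@')).tail] := by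
  simp [PySem.Chars.splitOnMax, go_one (e.length + 1) e [] [] (by omega), h]

-- takeWhile/dropWhile at the first occurrence index
lemma twdw (e : List Char) : ∀ (n : Nat), ['@'] <+: e.drop n → (∀ i < n, ¬ ['@'] <+: e.drop i) →
    e.takeWhile (· ≠ '@') = e.take n ∧ e.dropWhile (· ≠ '@') = e.drop n := by
  induction e with
  | nil =>
    intro n h1 _
    simp at h1
  | cons c rest ih =>
    intro n h1 h2
    cases n with
    | zero =>
      rw [List.drop_zero] at h1
      obtain ⟨t, ht⟩ := h1
      cases ht
      simp [List.takeWhile, List.dropWhile]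
    | succ m =>
      have hc : c ≠ '@' := by
        intro hcc
        exact h2 0 (by omega) ⟨rest, by simp [hcc]⟩
      have h1' : ['@'] <+: rest.drop m := by simpa using h1
      have h2' : ∀ i < m, ¬ ['@'] <+: rest.drop i := by
        intro i hi hp
        exact h2 (i + 1) (by omega) (by simpa using hp)
      obtain ⟨ht, hd⟩ := ih m h1' h2'
      simp only [ne_eq, decide_not] at ht hd
      simp [hc, ht, hd]

-- e.startswith(w + "@") iff the local part with its '@' is exactly w + "@"
lemma prefix_local_iff (e w : List Char) (n : Nat)
    (h1 : ['@'] <+: e.drop n) (h2 : ∀ i < n, ¬ ['@'] <+: e.drop i) (hw : ('@' : Char) ∉ w) :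
    (w ++ ['@']) <+: e ↔ e.take (n + 1) = w ++ ['@'] := by
  have hn : n < e.length := by
    by_contra hh
    push Not at hh
    rw [List.drop_eq_nil_of_le hh] at h1
    simp at h1
  constructor
  · rintro ⟨r, hr⟩
    obtain ⟨t, ht⟩ := h1
    have he : e[n]? = some '@' := by
      have h0 : (e.drop n)[0]? = some '@' := by rw [← ht]; rfl
      rw [List.getElem?_drop] at h0
      simpa using h0
    have hwn : w.length = n := by
      by_contra hne
      rcases Nat.lt_or_ge w.length n with hlt | hge
      · apply h2 w.length hlt
        refine ⟨r, ?_⟩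
        rw [← hr]
        simp
      · have hgt : n < w.length := by omega
        have he2 : w[n]? = some '@' := by
          rw [← hr, List.getElem?_append_left (by simp; omega),
              List.getElem?_append_left hgt] at he
          exact he
        exact hw (List.mem_of_getElem? he2)
    subst hwn
    rw [← hr, List.take_left' (by simp)]
  · intro ht
    rw [← ht]
    exact List.take_prefix _ _

lemma start_eq (e p w : List Char) (n : Nat) (hp : p = w ++ ['@'])
    (h1 : ['@'] <+: e.drop n) (h2 : ∀ i < n, ¬ ['@'] <+: e.drop i) (hw : ('@' : Char) ∉ w) :
    PySem.Chars.startswith e p = (e.take (n + 1) == p) := by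
  subst hp
  rw [Bool.eq_iff_iff, PySem.Chars.startswith_iff, beq_iff_eq]
  exact prefix_local_iff e w n h1 h2 hw

-- the dot-aligned-suffix enumeration finds d exactly when domain == d or domain ends with "." + d
lemma suffix_enum_iff (domain d : List Char) :
    (domain = d ∨ ('.' :: d) <:+ domain) ↔
      ∃ i : Int, (0 ≤ i ∧ i < (domain.length : Int) + 1) ∧
        (i = 0 ∨ PySem.List.pyGet? domain (i - 1) = some '.') ∧
        PySem.List.slice domain (some i) none = d := by
  constructor
  · rintro (rfl | ⟨u, hu⟩)
    · exact ⟨0, ⟨le_refl 0, by omega⟩, Or.inl rfl, by rw [PySem.List.slice_from _ le_rfl]; rfl⟩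
    · refine ⟨(u.length : Int) + 1, ⟨by omega, by rw [← hu]; simp⟩, ?_, ?_⟩
      · right
        have : ((u.length : Int) + 1 - 1) = ((u.length : Nat) : Int) := by omega
        rw [this, PySem.List.pyGet?_natCast, ← hu]
        simp
      · rw [show ((u.length : Int) + 1) = (((u.length + 1 : Nat)) : Int) by omega,
            PySem.List.slice_from _ (by omega), ← hu]
        simp
  · rintro ⟨i, ⟨h0, hlt⟩, hcond, hslice⟩
    rw [PySem.List.slice_from _ h0] at hslice
    by_cases hi : i = 0
    · left
      rw [hi] at hslice
      simpa using hslice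
    · right
      rcases hcond with rfl | hget
      · exact absurd rfl hi
      · have hn1 : i - 1 = (((i.toNat - 1 : Nat)) : Int) := by omega
        rw [hn1, PySem.List.pyGet?_natCast] at hget
        have hlen : i.toNat - 1 < domain.length := by
          by_contra hh
          push Not at hh
          rw [List.getElem?_eq_none hh] at hget
          simp at hget
        have hdrop : domain.drop (i.toNat - 1) = '.' :: d := by
          rw [List.drop_eq_getElem_cons hlen]
          have : domain[i.toNat - 1]'hlen = '.' := by
            have hg := List.getElem?_eq_getElem hlen
            rw [hg] at hget
            exact Option.some.inj hget
          rw [this, show i.toNat - 1 + 1 = i.toNat by omega, hslice]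
        exact ⟨domain.take (i.toNat - 1), by rw [← hdrop]; simp⟩

-- A's scan of the domain set equals B's enumeration of dot-aligned suffixes
lemma scan_eq (domain : List Char) :
    deadEndDomains.any (fun d => domain == d || PySem.Chars.endswith domain ('.' :: d)) =
      (PySem.List.pyRange 0 ((domain.length : Int) + 1) 1).any (fun i =>
        (i == 0 || PySem.List.pyGet? domain (i - 1) == some '.') &&
        deadEndDomains.contains (PySem.List.slice domain (some i) none)) := by
  rw [Bool.eq_iff_iff]
  simp only [List.any_eq_true, Bool.or_eq_true, Bool.and_eq_true, beq_iff_eq,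
    PySem.Chars.endswith_iff, PySem.List.mem_pyRange_one, List.contains_iff_mem]
  constructor
  · rintro ⟨d, hd, hP⟩
    obtain ⟨i, hi, hcond, hsl⟩ := (suffix_enum_iff domain d).1 hP
    exact ⟨i, hi, hcond, hsl ▸ hd⟩
  · rintro ⟨i, hi, hcond, hmem⟩
    exact ⟨_, hmem, (suffix_enum_iff domain _).2 ⟨i, hi, hcond, rfl⟩⟩

-- the two bodies agree on the shared normalised string e
lemma body_eq (e : List Char) :
    (if e.isEmpty || !(PySem.Chars.isIn ['@'] e) then false
     else if deadEndEmails.any (fun p => PySem.Chars.startswith e p) then true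
     else
       let domain := (PySem.List.pyGet? (PySem.Chars.splitOnMax e ['@'] 1) 1).getD []
       if deadEndDomains.any (fun d => domain == d || PySem.Chars.endswith domain ('.' :: d)) then true
       else false) =
    (if e.isEmpty || !(PySem.Chars.isIn ['@'] e) then false
     else
       let k := PySem.Chars.find e ['@']
       if deadEndEmails.contains (PySem.List.slice e none (some (k + 1))) then true
       else
         let domain := PySem.List.slice e (some (k + 1)) none
         (PySem.List.pyRange 0 (domain.length + 1) 1).any (fun i =>
           (i == 0 || PySem.List.pyGet? domain (i - 1) == some '.') &&
           deadEndDomains.contains (PySem.List.slice domain (some i) none))) := by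
  by_cases hg : (e.isEmpty || !(PySem.Chars.isIn ['@'] e)) = true
  · rw [if_pos hg, if_pos hg]
  · rw [if_neg hg, if_neg hg]
    have hin : PySem.Chars.isIn ['@'] e = true := by
      cases hI : PySem.Chars.isIn ['@'] e
      · exact absurd (by simp [hI]) hg
      · rfl
    have hfind0 : 0 ≤ PySem.Chars.find e ['@'] :=
      (PySem.Chars.find_nonneg_iff e ['@']).mpr ((PySem.Chars.isIn_iff_infix ['@'] e).mp hin)
    obtain ⟨h1, h2⟩ := PySem.Chars.find_spec hfind0
    set k := PySem.Chars.find e ['@'] with hk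
    have hk1 : (k + 1).toNat = k.toNat + 1 := by omega
    have hsliceB : PySem.List.slice e none (some (k + 1)) = e.take (k.toNat + 1) := by
      rw [PySem.List.slice_to e (by omega), hk1]
    have hpre : deadEndEmails.any (fun p => PySem.Chars.startswith e p)
        = deadEndEmails.contains (PySem.List.slice e none (some (k + 1))) := by
      rw [hsliceB]
      simp only [deadEndEmails, List.map_cons, List.map_nil, List.any_cons, List.any_nil,
        List.contains_cons, List.contains_nil]
      rw [start_eq e _ ("noreply".toList) k.toNat (by decide) h1 h2 (by decide),
          start_eq e _ ("no-reply".toList) k.toNat (by decide) h1 h2 (by decide),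
          start_eq e _ ("donotreply".toList) k.toNat (by decide) h1 h2 (by decide),
          start_eq e _ ("do-not-reply".toList) k.toNat (by decide) h1 h2 (by decide)]
    rw [hpre]
    by_cases hb : deadEndEmails.contains (PySem.List.slice e none (some (k + 1))) = true
    · rw [if_pos hb, if_pos hb]
    · rw [if_neg hb, if_neg hb]
      have hmem : '@' ∈ e := List.mem_of_mem_drop (h1.subset (by simp))
      obtain ⟨htw, hdw⟩ := twdw e k.toNat h1 h2
      have hdA : (PySem.List.pyGet? (PySem.Chars.splitOnMax e ['@'] 1) 1).getD []
          = e.drop (k.toNat + 1) := by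
        rw [split_char e hmem, htw, hdw,
            show (1 : Int) = ((1 : Nat) : Int) from rfl, PySem.List.pyGet?_natCast]
        simp [List.tail_drop]
      have hdB : PySem.List.slice e (some (k + 1)) none = e.drop (k.toNat + 1) := by
        rw [PySem.List.slice_from e (by omega), hk1]
      simp only [hdA, hdB]
      rw [scan_eq (e.drop (k.toNat + 1))]
      cases (PySem.List.pyRange 0 (((e.drop (k.toNat + 1)).length : Int) + 1) 1).any (fun i =>
          (i == 0 || PySem.List.pyGet? (e.drop (k.toNat + 1)) (i - 1) == some '.') &&
          deadEndDomains.contains (PySem.List.slice (e.drop (k.toNat + 1)) (some i) none)) <;> simp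

-- ===== VERDICT (by name: the statement is the Claim_ definition above) =====
theorem is_dead_end_email_py_spec : Claim_equal_is_dead_end_email_py := by
  intro email _
  unfold Spec_is_dead_end_email_py is_dead_end_email_py is_dead_end_email_py_alt
  exact body_eq _
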